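-- pv_equiv track=rewrite | github.com/blubbity/codingPractice | KickStart/2013/Round A/rational_number_tree.py | to_bin_path
-- ===== SOURCE A (Python) =====
-- def to_bin_path(dec_num): #converts deciminal to binary, excluding most significant digit
-- # as 1 = 1, but 1 is the root of the tree so you don't choose a direction to get to 1
-- 	digits = []
-- 	while dec_num > 1:
-- 		if dec_num % 2 == 0:
-- 			digits = [0]+digits
-- 		else:
-- 			digits = [1]+digits
-- 		dec_num = dec_num//2
-- 	return digits
-- ===== SOURCE B (Python) =====
-- def to_bin_path(dec_num):
--     if dec_num <= 1:
--         return []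
--     b = dec_num.bit_length()
--     return [(dec_num >> i) & 1 for i in range(b - 2, -1, -1)]
-- ===== Notes on version B (the rewrite author's own statement) =====
-- stated objective: alternative
-- what changed: B computes the bit length first and emits the digits MSB-first with shift-and-mask over a descending range, instead of A's divide-by-two loop that prepends LSB-first.
import Mathlib
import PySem

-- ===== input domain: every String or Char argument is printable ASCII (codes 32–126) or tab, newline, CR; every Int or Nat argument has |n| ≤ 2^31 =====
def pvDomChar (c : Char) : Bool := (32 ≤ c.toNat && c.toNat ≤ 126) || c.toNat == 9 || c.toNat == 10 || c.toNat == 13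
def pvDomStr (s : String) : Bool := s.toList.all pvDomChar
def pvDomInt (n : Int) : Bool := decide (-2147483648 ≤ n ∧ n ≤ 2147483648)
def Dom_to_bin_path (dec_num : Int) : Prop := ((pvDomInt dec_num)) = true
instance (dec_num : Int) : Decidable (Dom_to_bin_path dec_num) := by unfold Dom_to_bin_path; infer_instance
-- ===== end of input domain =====

-- B rebuilds the digit list MSB-first from the bit length with shift-and-mask, instead of
-- A's divide-by-two loop that prepends LSB-first (objective: alternative decomposition).

-- ===== PORT A =====
-- A's while-loop: prepend the parity bit, halve, until dec_num ≤ 1.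
def toBinLoopA (dec_num : Int) (digits : List Int) : List Int :=
  if _h : dec_num > 1 then
    toBinLoopA (PySem.Int.floordiv dec_num 2)
      ((if PySem.Int.mod dec_num 2 == 0 then (0:Int) else 1) :: digits)
  else digits
termination_by dec_num.toNat
decreasing_by
  rw [PySem.Int.floordiv_eq_ediv_of_pos (by omega : (0:Int) < 2)]
  omega

def to_bin_path (dec_num : Int) : List Int := toBinLoopA dec_num []

-- ===== PORT B =====
-- Source B: if dec_num <= 1: return []; b = dec_num.bit_length();
--       return [(dec_num >> i) & 1 for i in range(b-2, -1, -1)]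
-- range(b-2,-1,-1) = [b-2, ..., 0] = (List.range (b-1)).reverse; >> and & are Python-exact here.
def to_bin_path_alt (dec_num : Int) : List Int :=
  if dec_num ≤ 1 then []
  else
    (List.range (PySem.Int.bitLength dec_num - 1)).reverse.map
      (fun (i : Nat) => PySem.Int.band (dec_num >>> i) 1)

-- ===== PRECONDITION & SPEC =====
def Spec_to_bin_path (dec_num : Int) (out : List Int) : Prop := out = to_bin_path_alt dec_num
instance (dec_num : Int) (out : List Int) : Decidable (Spec_to_bin_path dec_num out) := by unfold Spec_to_bin_path; infer_instance

-- ===== CLAIM (what is proved, stated in full; the proofs are below) =====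
def Claim_equal_to_bin_path : Prop := ∀ (dec_num : Int), Dom_to_bin_path dec_num → Spec_to_bin_path dec_num (to_bin_path dec_num)

-- ===== LEMMAS AND PROOFS =====

-- For positive inputs the guard in B's port can be dropped (at 1 both sides are []).
theorem alt_pos (n : Int) (hn : 0 < n) :
    to_bin_path_alt n =
      (List.range (PySem.Int.bitLength n - 1)).reverse.map
        (fun (i : Nat) => PySem.Int.band (n >>> i) 1) := by
  unfold to_bin_path_alt
  by_cases h : n ≤ 1
  · have : n = 1 := by omega
    subst this
    have : PySem.Int.bitLength 1 = 1 := by decide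
    simp [this]
  · simp [h]

theorem shift_succ (n : Int) (i : Nat) :
    n >>> (i + 1) = (PySem.Int.floordiv n 2) >>> i := by
  rw [PySem.Int.floordiv_eq_ediv_of_pos (by omega : (0:Int) < 2),
    Int.shiftRight_eq_div_pow, Int.shiftRight_eq_div_pow]
  push_cast
  rw [pow_succ, mul_comm, ← Int.ediv_ediv_of_nonneg (by omega : (0:Int) ≤ 2)]

-- MSB-first peeling: for n > 1 the B-list of n is the B-list of n//2 followed by n's last bit.
theorem alt_step (n : Int) (hn : 1 < n) :
    to_bin_path_alt n = to_bin_path_alt (PySem.Int.floordiv n 2) ++ [PySem.Int.band n 1] := by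
  set m := PySem.Int.floordiv n 2 with hm
  have hmpos : 0 < m := by
    have := PySem.Int.le_floordiv_iff_mul_le (a := n) (b := 2) (q := 1) (by omega)
    omega
  have hbl : PySem.Int.bitLength n = PySem.Int.bitLength m + 1 := by
    rw [hm]; exact PySem.Int.bitLength_of_pos (by omega)
  have hblm : 1 ≤ PySem.Int.bitLength m := by
    rw [PySem.Int.bitLength_of_pos hmpos]; omega
  rw [alt_pos n (by omega), alt_pos m hmpos, hbl]
  have hk : PySem.Int.bitLength m + 1 - 1 = (PySem.Int.bitLength m - 1) + 1 := by omega
  rw [hk, List.range_succ_eq_map, List.reverse_cons, List.map_append]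
  congr 1
  · rw [← List.map_reverse, List.map_map]
    apply List.map_congr_left
    intro i _
    simp only [Function.comp_apply, Nat.succ_eq_add_one]
    rw [shift_succ]
  · simp

-- A's prepended bit is n & 1.
theorem bit_eq (n : Int) :
    (if PySem.Int.mod n 2 == 0 then (0:Int) else 1) = PySem.Int.band n 1 := by
  rcases PySem.Int.mod_two_eq n with h | h <;> rw [PySem.Int.band_one, h] <;> norm_num

-- Loop invariant: A's loop produces B's list in front of the accumulator.
theorem loopA_eq (n : Int) (digits : List Int) :
    toBinLoopA n digits = to_bin_path_alt n ++ digits := by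
  induction n, digits using toBinLoopA.induct with
  | case1 n digits h ih =>
    simp only [dite_eq_ite] at ih
    rw [toBinLoopA, dif_pos h, ih, bit_eq, alt_step n h]
    simp
  | case2 n digits h =>
    rw [toBinLoopA, dif_neg h]
    unfold to_bin_path_alt
    simp [show n ≤ 1 by omega]

-- ===== VERDICT (by name: the statement is the Claim_ definition above) =====
theorem to_bin_path_spec : Claim_equal_to_bin_path := by
  intro n _
  unfold Spec_to_bin_path to_bin_path
  rw [loopA_eq]
  simp
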